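-- pv_equiv track=rewrite | github.com/hsci-r/filter-db | scripts/map_columns.py | map_fieldnames
-- ===== SOURCE A (Python) =====
-- def map_fieldnames(fieldnames, cols_from, cols_to, multiple=False):
--     result = []
--     added = False
--     for f in fieldnames:
--         # insert cols_to at the index of the first column of cols_from
--         if f in cols_from:
--             if not added:
--                 result.extend(cols_to)
--                 added = True
--         else:
--             result.append(f)
--     return result
-- ===== SOURCE B (Python) =====
-- def map_fieldnames(fieldnames, cols_from, cols_to, multiple=False):
--     fields = list(fieldnames)
--     first = next((i for i, f in enumerate(fields) if f in cols_from), None)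
--     if first is None:
--         return fields
--     return fields[:first] + list(cols_to) + [f for f in fields[first:] if f not in cols_from]
-- ===== Notes on version B (the rewrite author's own statement) =====
-- stated objective: alternative
-- what changed: Replaces A's single flag-driven sweep with a two-phase construction: find the index of the first field in cols_from, then concatenate the untouched prefix, cols_to, and the filtered remainder.
import Mathlib
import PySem

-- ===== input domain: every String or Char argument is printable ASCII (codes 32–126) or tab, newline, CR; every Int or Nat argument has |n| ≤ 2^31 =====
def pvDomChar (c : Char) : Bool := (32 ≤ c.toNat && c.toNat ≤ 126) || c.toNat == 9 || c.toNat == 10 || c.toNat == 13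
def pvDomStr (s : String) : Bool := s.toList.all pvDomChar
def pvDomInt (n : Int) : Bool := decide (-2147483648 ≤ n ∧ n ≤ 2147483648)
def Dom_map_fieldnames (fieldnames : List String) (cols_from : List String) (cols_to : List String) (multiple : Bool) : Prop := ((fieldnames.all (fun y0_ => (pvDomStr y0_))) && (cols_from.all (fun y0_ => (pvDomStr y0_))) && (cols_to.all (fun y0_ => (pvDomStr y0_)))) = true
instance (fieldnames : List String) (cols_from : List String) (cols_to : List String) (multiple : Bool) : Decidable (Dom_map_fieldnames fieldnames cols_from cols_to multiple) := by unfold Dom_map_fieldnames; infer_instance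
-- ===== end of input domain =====

-- B finds the split point first and builds the result by concatenation instead of A's flag-driven sweep; same cost, different decomposition.

-- ===== PORT A =====
-- A: one pass, accumulating `result` and an `added` flag.
def map_fieldnames (fieldnames : List String) (cols_from : List String) (cols_to : List String) (multiple : Bool) : List String :=
  (fieldnames.foldl (fun (st : List String × Bool) f =>
    if cols_from.contains f then
      if !st.2 then (st.1 ++ cols_to, true) else st
    else (st.1 ++ [f], st.2)) ([], false)).1

-- ===== PORT B =====
-- B: index of first field in cols_from; prefix ++ cols_to ++ filtered suffix.
def map_fieldnames_alt (fieldnames : List String) (cols_from : List String) (cols_to : List String) (multiple : Bool) : List String :=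
  match fieldnames.findIdx? (fun f => cols_from.contains f) with
  | none => fieldnames
  | some i => fieldnames.take i ++ cols_to ++ (fieldnames.drop i).filter (fun f => !cols_from.contains f)

-- ===== PRECONDITION & SPEC =====
def Spec_map_fieldnames (fieldnames : List String) (cols_from : List String) (cols_to : List String) (multiple : Bool) (out : List String) : Prop := out = map_fieldnames_alt fieldnames cols_from cols_to multiple
instance (fieldnames : List String) (cols_from : List String) (cols_to : List String) (multiple : Bool) (out : List String) : Decidable (Spec_map_fieldnames fieldnames cols_from cols_to multiple out) := by unfold Spec_map_fieldnames; infer_instance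

-- ===== CLAIM (what is proved, stated in full; the proofs are below) =====
def Claim_equal_map_fieldnames : Prop := ∀ (fieldnames : List String) (cols_from : List String) (cols_to : List String) (multiple : Bool), Dom_map_fieldnames fieldnames cols_from cols_to multiple → Spec_map_fieldnames fieldnames cols_from cols_to multiple (map_fieldnames fieldnames cols_from cols_to multiple)

-- ===== LEMMAS AND PROOFS =====

-- A's loop once the flag is set: it just filters the remaining fields.
theorem loop_true (cols_from cols_to : List String) (fs res : List String) :
    (fs.foldl (fun (st : List String × Bool) f =>
      if cols_from.contains f then
        if !st.2 then (st.1 ++ cols_to, true) else st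
      else (st.1 ++ [f], st.2)) (res, true)) =
    (res ++ fs.filter (fun f => !cols_from.contains f), true) := by
  induction fs generalizing res with
  | nil => simp
  | cons h t ih =>
    by_cases hc : h ∈ cols_from
    · simpa [List.foldl_cons, hc, List.filter_cons] using ih res
    · simpa [List.foldl_cons, hc, List.filter_cons] using ih (res ++ [h])

-- A's loop before the flag is set equals B's construction.
theorem loop_false (cols_from cols_to : List String) (fs res : List String) :
    (fs.foldl (fun (st : List String × Bool) f =>
      if cols_from.contains f then
        if !st.2 then (st.1 ++ cols_to, true) else st
      else (st.1 ++ [f], st.2)) (res, false)).1 =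
    res ++ (match fs.findIdx? (fun f => cols_from.contains f) with
      | none => fs
      | some i => fs.take i ++ cols_to ++ (fs.drop i).filter (fun f => !cols_from.contains f)) := by
  induction fs generalizing res with
  | nil => simp
  | cons h t ih =>
    rw [List.foldl_cons]
    by_cases hc : h ∈ cols_from
    · have hcb : cols_from.contains h = true := by simpa using hc
      simp only [hcb, Bool.not_false, if_true]
      rw [loop_true]
      simp [List.findIdx?_cons, hc, List.append_assoc]
    · have hcb : cols_from.contains h = false := by simpa using hc
      simp only [hcb, Bool.false_eq_true, if_false]
      rw [ih]
      cases ht : t.findIdx? (fun f => cols_from.contains f) with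
      | none =>
        simp only [List.contains_eq_mem] at ht
        simp [List.findIdx?_cons, hc, ht]
      | some i =>
        simp only [List.contains_eq_mem] at ht
        simp [List.findIdx?_cons, hc, ht, List.filter_cons, List.append_assoc]

-- ===== VERDICT (by name: the statement is the Claim_ definition above) =====
theorem map_fieldnames_spec : Claim_equal_map_fieldnames := by
  intro fieldnames cols_from cols_to multiple _
  show map_fieldnames fieldnames cols_from cols_to multiple = _
  unfold map_fieldnames map_fieldnames_alt
  rw [loop_false]
  simp
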